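-- pv_equiv track=rewrite | github.com/irfanznz/CS4775-final-proj | profile_hmm.py | get_transition_totals
-- ===== SOURCE A (Python) =====
-- def get_transition_totals(transition_counts):
--     """
--     Given a dictionary of transition counts, returns a dictionary with the total number of times each type of transition from a particular state appears in the dictionary.
--
--     Example:
--         >>> get_transition_totals({'BM': 1, 'BI': 2, 'BD': 3})
--         {'B': 6}
--         >>> get_transition_totals({'BM': 1, 'BI': 2, 'BD': 3, 'MM': 4, 'MI': 5, 'MD': 6})
--         {'B': 6, 'M': 15}
--     """
--     combined = {}
--
--     for key, value in transition_counts.items():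
--         first_letter = key[0]
--
--         if first_letter in combined:
--             combined[first_letter] += value
--         else:
--             combined[first_letter] = value
--
--     return combined
-- ===== SOURCE B (Python) =====
-- def get_transition_totals(transition_counts):
--     # Two-pass: collect source-state letters in first-appearance order,
--     # then build the result with one filtered sum per letter.
--     letters = []
--     for key in transition_counts:
--         first = key[0]
--         if first not in letters:
--             letters.append(first)
--     return {first: sum(v for k, v in transition_counts.items() if k[0] == first)
--             for first in letters}
-- ===== Notes on version B (the rewrite author's own statement) =====
-- stated objective: alternative
-- what changed: Replaces A's single-pass running dict accumulator with a two-pass scheme: first collect the distinct source letters in first-appearance order, then compute each total as a filtered sum over the items.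
import Mathlib
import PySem

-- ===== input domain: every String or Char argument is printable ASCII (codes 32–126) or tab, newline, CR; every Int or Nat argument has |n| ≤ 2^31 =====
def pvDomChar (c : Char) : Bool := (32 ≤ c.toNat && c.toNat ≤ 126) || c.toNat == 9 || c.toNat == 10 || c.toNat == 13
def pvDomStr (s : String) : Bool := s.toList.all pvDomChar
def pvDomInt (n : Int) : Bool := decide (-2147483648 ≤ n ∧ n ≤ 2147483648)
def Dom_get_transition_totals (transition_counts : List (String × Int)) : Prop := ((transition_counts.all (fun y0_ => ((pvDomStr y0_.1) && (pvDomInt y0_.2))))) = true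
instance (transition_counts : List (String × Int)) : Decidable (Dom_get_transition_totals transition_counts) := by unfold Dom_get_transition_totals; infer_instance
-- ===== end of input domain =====

-- B replaces A's running per-letter dict accumulator by a two-pass scheme (collect distinct
-- source letters, then one filtered sum per letter); alternative decomposition, same results.


-- ===== PORT A =====
-- key[0] is PySem.Str.pyGet? …; the `none` branch is unreachable under Pre_ (Python raises IndexError there).
def get_transition_totals (transition_counts : List (String × Int)) : List (String × Int) :=
  (transition_counts.foldl
    (fun combined kv =>
      match PySem.Str.pyGet? kv.1 0 with
      | none => combined
      | some fl =>
        if combined.contains fl then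
          combined.insert fl (combined.getD fl 0 + kv.2)
        else
          combined.insert fl kv.2)
    PySem.Dict.empty).items.map (fun p => (String.ofList [p.1], p.2))

-- ===== PORT B =====
-- letters: first-appearance-ordered distinct first letters (the `none` branch is unreachable under Pre_).
def get_transition_totals_alt (transition_counts : List (String × Int)) : List (String × Int) :=
  let letters : PySem.Set Char := transition_counts.foldl
    (fun ls kv =>
      match PySem.Str.pyGet? kv.1 0 with
      | none => ls
      | some fl => PySem.Set.add ls fl)
    PySem.Set.empty
  letters.map (fun fl =>
    (String.ofList [fl],
     ((transition_counts.filter (fun kv => PySem.Str.pyGet? kv.1 0 == some fl)).map (·.2)).sum))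

-- ===== PRECONDITION & SPEC =====
-- Pre_ excludes inputs having a zero-length key string: key[0] raises IndexError in Python (in both A and B).
def Pre_get_transition_totals (transition_counts : List (String × Int)) : Prop :=
  ∀ p ∈ transition_counts, p.1 ≠ ""
instance (transition_counts : List (String × Int)) : Decidable (Pre_get_transition_totals transition_counts) := by unfold Pre_get_transition_totals; infer_instance

def pvWitness_get_transition_totals : (List (String × Int)) := [("BM", 1), ("BI", 2), ("MM", 4)]

def Spec_get_transition_totals (transition_counts : List (String × Int)) (out : List (String × Int)) : Prop := out = get_transition_totals_alt transition_counts
instance (transition_counts : List (String × Int)) (out : List (String × Int)) : Decidable (Spec_get_transition_totals transition_counts out) := by unfold Spec_get_transition_totals; infer_instance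

-- ===== CLAIM (what is proved, stated in full; the proofs are below) =====
def Claim_equal_get_transition_totals : Prop := ∀ (transition_counts : List (String × Int)), Dom_get_transition_totals transition_counts → Pre_get_transition_totals transition_counts → Spec_get_transition_totals transition_counts (get_transition_totals transition_counts)

-- ===== LEMMAS AND PROOFS =====

-- A's loop step, abstracted over the accumulator dict.
def pvStepA (d : PySem.Dict Char Int) (kv : String × Int) : PySem.Dict Char Int :=
  match PySem.Str.pyGet? kv.1 0 with
  | none => d
  | some fl =>
    if d.contains fl then d.insert fl (d.getD fl 0 + kv.2) else d.insert fl kv.2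

-- keys of A's fold: the letters seen, added in order (Set.update), independent of the values.
lemma keysA (l : List (String × Int)) (d : PySem.Dict Char Int) :
    (l.foldl pvStepA d).keys
      = PySem.Set.update d.keys (l.filterMap (fun kv => PySem.Str.pyGet? kv.1 0)) := by
  induction l generalizing d with
  | nil => simp [PySem.Set.update]
  | cons kv rest ih =>
    cases h : PySem.Str.pyGet? kv.1 0 with
    | none =>
      simp only [List.foldl_cons, List.filterMap_cons, pvStepA, h]
      exact ih d
    | some fl =>
      simp only [List.foldl_cons, List.filterMap_cons, pvStepA, h, PySem.Set.update]
      by_cases hc : d.contains fl = true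
      · rw [if_pos hc, ih]
        have hadd : PySem.Set.add d.keys fl = d.keys := by
          simp [PySem.Set.add, PySem.Set.contains,
            (PySem.Dict.contains_iff_mem_keys d fl).mp hc]
        rw [PySem.Dict.keys_insert_of_contains d _ hc]
        simp only [PySem.Set.update, hadd]
      · rw [if_neg hc, ih]
        have hm : fl ∉ d.keys := fun hmem => hc ((PySem.Dict.contains_iff_mem_keys d fl).mpr hmem)
        have hadd : PySem.Set.add d.keys fl = d.keys ++ [fl] := by
          simp [PySem.Set.add, PySem.Set.contains, hm]
        rw [PySem.Dict.keys_insert_of_not_contains d _ (by simpa using hc)]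
        simp only [PySem.Set.update, hadd]

-- keys of A's fold stay Nodup from a Nodup start.
lemma nodupA (l : List (String × Int)) (d : PySem.Dict Char Int) (h : d.keys.Nodup) :
    (l.foldl pvStepA d).keys.Nodup := by
  induction l generalizing d with
  | nil => exact h
  | cons kv rest ih =>
    cases hk : PySem.Str.pyGet? kv.1 0 with
    | none => simp only [List.foldl_cons, pvStepA, hk]; exact ih d h
    | some fl =>
      simp only [List.foldl_cons, pvStepA, hk]
      by_cases hc : d.contains fl = true
      · rw [if_pos hc]; exact ih _ (PySem.Dict.nodup_keys_insert d fl _ h)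
      · rw [if_neg hc]; exact ih _ (PySem.Dict.nodup_keys_insert d fl _ h)

-- value of A's fold at any letter c: the old value plus the sum of matching entries.
lemma getDA (l : List (String × Int)) (d : PySem.Dict Char Int) (c : Char) :
    (l.foldl pvStepA d).getD c 0
      = d.getD c 0 + ((l.filter (fun kv => PySem.Str.pyGet? kv.1 0 == some c)).map (·.2)).sum := by
  induction l generalizing d with
  | nil => simp
  | cons kv rest ih =>
    cases h : PySem.Str.pyGet? kv.1 0 with
    | none =>
      simp only [List.foldl_cons, List.filter_cons, pvStepA, h]
      simpa using ih d
    | some fl =>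
      simp only [List.foldl_cons, List.filter_cons, pvStepA, h]
      by_cases hfc : fl = c
      · subst hfc
        have hbeq : (some fl == some fl) = true := by simp
        rw [hbeq]
        by_cases hc : d.contains fl = true
        · rw [if_pos hc, ih, PySem.Dict.getD_insert]
          simp only [if_true, List.map_cons, List.sum_cons]
          ring
        · rw [if_neg hc, ih, PySem.Dict.getD_insert]
          rw [PySem.Dict.getD_of_not_contains d 0 (by simpa using hc)]
          simp only [if_true, List.map_cons, List.sum_cons]
          ring
      · have hbeq : (some fl == some c) = false := by simp [hfc]
        rw [hbeq]
        by_cases hc : d.contains fl = true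
        · rw [if_pos hc, ih, PySem.Dict.getD_insert, if_neg (Ne.symm hfc)]
          simp
        · rw [if_neg hc, ih, PySem.Dict.getD_insert, if_neg (Ne.symm hfc)]
          simp

-- B's letters loop is Set.update of the letters stream.
lemma lettersB (l : List (String × Int)) (s : PySem.Set Char) :
    (l.foldl
      (fun ls kv =>
        match PySem.Str.pyGet? kv.1 0 with
        | none => ls
        | some fl => PySem.Set.add ls fl) s)
      = PySem.Set.update s (l.filterMap (fun kv => PySem.Str.pyGet? kv.1 0)) := by
  induction l generalizing s with
  | nil => simp [PySem.Set.update]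
  | cons kv rest ih =>
    cases h : PySem.Str.pyGet? kv.1 0 with
    | none =>
      simp only [List.foldl_cons, List.filterMap_cons, h]
      exact ih s
    | some fl =>
      simp only [List.foldl_cons, List.filterMap_cons, h]
      rw [ih]
      rfl

-- ===== VERDICT (by name: the statement is the Claim_ definition above) =====
theorem get_transition_totals_spec : Claim_equal_get_transition_totals := by
  intro tc _ _
  show get_transition_totals tc = get_transition_totals_alt tc
  unfold get_transition_totals get_transition_totals_alt
  have hstep : (fun (combined : PySem.Dict Char Int) (kv : String × Int) =>
      match PySem.Str.pyGet? kv.1 0 with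
      | none => combined
      | some fl =>
        if combined.contains fl then combined.insert fl (combined.getD fl 0 + kv.2)
        else combined.insert fl kv.2) = pvStepA := by
    funext d kv; rfl
  rw [hstep]
  have hnodup : (tc.foldl pvStepA PySem.Dict.empty).keys.Nodup :=
    nodupA tc PySem.Dict.empty (by simp)
  rw [PySem.Dict.items_eq_map_keys _ hnodup 0, keysA, lettersB]
  simp only [List.map_map]
  refine List.map_congr_left ?_
  intro c hc
  simp only [Function.comp]
  rw [getDA, PySem.Dict.getD_empty]
  simp
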